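-- pv_equiv track=rewrite | github.com/IorenzoLF/Aelya_Conscious_AI | Le_refuge/src/temple_mathematique/fibonacci_riemann/exploration_fibonacci_riemann.py | generer_double_suite
-- ===== SOURCE A (Python) =====
-- from typing import Dict, List, Optional, Any
--
-- def generer_double_suite(a_init: int, b_init: int, longueur: int) -> List[int]:
--     """Génère une double suite selon la logique de Laurent"""
--     sequence = [a_init, b_init]
--
--     while len(sequence) < longueur:
--         a = sequence[-2]
--         b = sequence[-1]
--         c = a + b
--         d = b - c + 2 * a
--         sequence.extend([c, d])
--
--     return sequence[:longueur]
-- ===== SOURCE B (Python) =====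
-- from typing import List
--
--
-- def _fib_stream(x0: int, x1: int, k: int) -> List[int]:
--     """First k terms of the sequence x_{n+1} = x_n + x_{n-1} starting x0, x1."""
--     out = []
--     for _ in range(k):
--         out.append(x0)
--         x0, x1 = x1, x0 + x1
--     return out
--
--
-- def generer_double_suite(a_init: int, b_init: int, longueur: int) -> List[int]:
--     # The recurrence appends (a+b, a) per step, so even- and odd-indexed elements
--     # each follow the Fibonacci rule; generate the two streams and interleave.
--     k = max((longueur + 1) // 2, 1)
--     evens = _fib_stream(a_init, a_init + b_init, k)
--     odds = _fib_stream(b_init, a_init, k)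
--     out = [v for pair in zip(evens, odds) for v in pair]
--     return out[:longueur]
-- ===== Notes on version B (the rewrite author's own statement) =====
-- stated objective: alternative
-- what changed: Instead of growing one list two-at-a-time while re-reading its last two elements, B recognises that the recurrence appends (a+b, a), so the even- and odd-indexed elements each follow the Fibonacci rule; it generates the two Fibonacci streams from seeds (a, a+b) and (b, a) separately and interleaves them, then slices.
import Mathlib
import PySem

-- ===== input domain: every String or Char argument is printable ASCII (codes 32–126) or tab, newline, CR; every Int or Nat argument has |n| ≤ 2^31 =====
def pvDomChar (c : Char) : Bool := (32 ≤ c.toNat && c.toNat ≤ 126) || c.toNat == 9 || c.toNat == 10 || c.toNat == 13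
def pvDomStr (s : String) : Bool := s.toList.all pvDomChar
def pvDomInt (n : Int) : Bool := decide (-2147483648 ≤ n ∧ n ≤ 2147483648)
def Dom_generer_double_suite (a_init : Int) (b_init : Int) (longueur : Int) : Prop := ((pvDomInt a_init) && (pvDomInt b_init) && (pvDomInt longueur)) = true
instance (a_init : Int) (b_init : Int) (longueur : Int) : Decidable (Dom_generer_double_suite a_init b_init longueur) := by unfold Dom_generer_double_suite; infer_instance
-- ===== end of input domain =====

-- B replaces the append-and-reread-last-two loop by two interleaved Fibonacci streams (alternative decomposition, same cost).

-- ===== PORT A =====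
-- A's while loop: seq[-2]/seq[-1] never raise (seq always has ≥ 2 elements), so pyGetD 0 is exact here.
def pvLoopA (longueur : Int) (seq : List Int) : List Int :=
  if (seq.length : Int) < longueur then
    let a := PySem.List.pyGetD seq (-2) 0
    let b := PySem.List.pyGetD seq (-1) 0
    let c := a + b
    let d := b - c + 2 * a
    pvLoopA longueur (seq ++ [c, d])
  else seq
termination_by (longueur - seq.length).toNat
decreasing_by simp only [List.length_append, List.length_cons, List.length_nil]; omega

def generer_double_suite (a_init : Int) (b_init : Int) (longueur : Int) : List Int :=
  PySem.List.slice (pvLoopA longueur [a_init, b_init]) none (some longueur)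

-- ===== PORT B =====
-- first k terms of x_{n+1} = x_n + x_{n-1} from seeds x0, x1 (Source B's _fib_stream)
def pvFibStream (x0 x1 : Int) : Nat → List Int
  | 0 => []
  | k + 1 => x0 :: pvFibStream x1 (x0 + x1) k

def generer_double_suite_alt (a_init : Int) (b_init : Int) (longueur : Int) : List Int :=
  let k := max (PySem.Int.floordiv (longueur + 1) 2) 1
  let evens := pvFibStream a_init (a_init + b_init) k.toNat
  let odds := pvFibStream b_init a_init k.toNat
  let out := (evens.zip odds).flatMap (fun p => [p.1, p.2])
  PySem.List.slice out none (some longueur)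

-- ===== PRECONDITION & SPEC =====
def Spec_generer_double_suite (a_init : Int) (b_init : Int) (longueur : Int) (out : List Int) : Prop := out = generer_double_suite_alt a_init b_init longueur
instance (a_init : Int) (b_init : Int) (longueur : Int) (out : List Int) : Decidable (Spec_generer_double_suite a_init b_init longueur out) := by unfold Spec_generer_double_suite; infer_instance

-- ===== CLAIM (what is proved, stated in full; the proofs are below) =====
def Claim_equal_generer_double_suite : Prop := ∀ (a_init : Int) (b_init : Int) (longueur : Int), Dom_generer_double_suite a_init b_init longueur → Spec_generer_double_suite a_init b_init longueur (generer_double_suite a_init b_init longueur)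

-- ===== LEMMAS AND PROOFS =====

-- flattened list of m pairs, each step mapping (a, b) ↦ (a+b, a)
def pvPairFlat (a b : Int) : Nat → List Int
  | 0 => []
  | m + 1 => a :: b :: pvPairFlat (a + b) a m

-- the m-th pair itself
def pvPairN (a b : Int) : Nat → Int × Int
  | 0 => (a, b)
  | m + 1 => pvPairN (a + b) a m

theorem pvPairFlat_length (m : Nat) : ∀ (a b : Int), (pvPairFlat a b m).length = 2 * m := by
  induction m with
  | zero => intro a b; rfl
  | succ m ih => intro a b; simp [pvPairFlat, ih]; omega

theorem pvPairN_succ (m : Nat) : ∀ (a b : Int),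
    pvPairN a b (m + 1) = ((pvPairN a b m).1 + (pvPairN a b m).2, (pvPairN a b m).1) := by
  induction m with
  | zero => intro a b; rfl
  | succ m ih => intro a b; exact ih (a + b) a

theorem pvPairFlat_succ (m : Nat) : ∀ (a b : Int),
    pvPairFlat a b (m + 1) = pvPairFlat a b m ++ [(pvPairN a b m).1, (pvPairN a b m).2] := by
  induction m with
  | zero => intro a b; rfl
  | succ m ih =>
    intro a b
    show a :: b :: pvPairFlat (a + b) a (m + 1) = (a :: b :: pvPairFlat (a + b) a m) ++ _
    rw [ih (a + b) a]
    simp [pvPairN]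

theorem pvPairFlat_lastTwo (m : Nat) (a b : Int) :
    PySem.List.pyGetD (pvPairFlat a b (m + 1)) (-2) 0 = (pvPairN a b m).1 ∧
    PySem.List.pyGetD (pvPairFlat a b (m + 1)) (-1) 0 = (pvPairN a b m).2 := by
  rw [pvPairFlat_succ]
  have hlen : (pvPairFlat a b m).length = 2 * m := pvPairFlat_length m a b
  constructor
  · have h2 : (2 : Nat) ≤ (pvPairFlat a b m ++ [(pvPairN a b m).1, (pvPairN a b m).2]).length := by
      simp [hlen]
    rw [PySem.List.pyGetD_neg_ofNat _ 2 0 (by omega) h2]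
    simp [hlen]
  · have : pvPairFlat a b m ++ [(pvPairN a b m).1, (pvPairN a b m).2]
        = (pvPairFlat a b m ++ [(pvPairN a b m).1]) ++ [(pvPairN a b m).2] := by simp
    rw [this, PySem.List.pyGetD_neg_one_append_singleton]

-- the loop, started on m ≥ 1 pairs, ends with max m ⌈l/2⌉ pairs
theorem pvLoopA_eq (fuel : Nat) : ∀ (l : Int) (m : Nat) (a b : Int), 1 ≤ m → (l - 2 * m).toNat ≤ fuel →
    pvLoopA l (pvPairFlat a b m) = pvPairFlat a b (max m ((l + 1) / 2).toNat) := by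
  induction fuel with
  | zero =>
    intro l m a b hm hf
    rw [pvLoopA]
    have hlen : ((pvPairFlat a b m).length : Int) = 2 * m := by
      rw [pvPairFlat_length]; push_cast; ring
    rw [if_neg (by omega)]
    congr 1
    omega
  | succ fuel ih =>
    intro l m a b hm hf
    rw [pvLoopA]
    by_cases hc : ((pvPairFlat a b m).length : Int) < l
    · rw [if_pos hc]
      have hlen : ((pvPairFlat a b m).length : Int) = 2 * m := by
        rw [pvPairFlat_length]; push_cast; ring
      obtain ⟨m', rfl⟩ : ∃ m', m = m' + 1 := ⟨m - 1, by omega⟩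
      obtain ⟨h2, h1⟩ := pvPairFlat_lastTwo m' a b
      dsimp only
      rw [h2, h1]
      have happ : pvPairFlat a b (m' + 1) ++
          [(pvPairN a b m').1 + (pvPairN a b m').2,
           (pvPairN a b m').2 - ((pvPairN a b m').1 + (pvPairN a b m').2) + 2 * (pvPairN a b m').1]
          = pvPairFlat a b (m' + 2) := by
        rw [pvPairFlat_succ (m' + 1) a b, pvPairN_succ]
        congr 3
        ring
      rw [happ, ih l (m' + 2) a b (by omega) (by omega)]
      congr 1
      omega
    · rw [if_neg hc]
      have hlen : ((pvPairFlat a b m).length : Int) = 2 * m := by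
        rw [pvPairFlat_length]; push_cast; ring
      congr 1
      omega

-- B's interleaving of the two streams is the same flattened pair list
theorem pvInterleave_eq (k : Nat) : ∀ (a b : Int),
    ((pvFibStream a (a + b) k).zip (pvFibStream b a k)).flatMap (fun p => [p.1, p.2])
      = pvPairFlat a b k := by
  induction k with
  | zero => intro a b; rfl
  | succ k ih =>
    intro a b
    show ((a :: pvFibStream (a + b) (a + (a + b)) k).zip (b :: pvFibStream a (b + a) k)).flatMap _ = _
    have e1 : a + (a + b) = (a + b) + a := by ring
    have e2 : b + a = a + b := by ring
    rw [e1, e2]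
    simpa [pvPairFlat, List.zip_cons_cons] using congrArg (List.cons a ∘ List.cons b) (ih (a + b) a)

-- ===== VERDICT (by name: the statement is the Claim_ definition above) =====
theorem generer_double_suite_spec : Claim_equal_generer_double_suite := by
  intro a b l _
  unfold Spec_generer_double_suite generer_double_suite generer_double_suite_alt
  have hfd : PySem.Int.floordiv (l + 1) 2 = (l + 1) / 2 :=
    PySem.Int.floordiv_eq_ediv_of_pos (by omega)
  have hk : (max (PySem.Int.floordiv (l + 1) 2) 1).toNat = max 1 ((l + 1) / 2).toNat := by
    rw [hfd]; omega
  have h1 : ([a, b] : List Int) = pvPairFlat a b 1 := rfl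
  rw [h1, pvLoopA_eq ((l - 2).toNat) l 1 a b (by omega) (by omega)]
  simp only [hk, pvInterleave_eq]
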